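-- pv_equiv track=rewrite | github.com/roshanbenji/AQI_analysis | scrape_cpcb.py | pick_best_station
-- ===== SOURCE A (Python) =====
-- def pick_best_station(stations: list) -> dict:
--     """
--     Pick the best (most central) station from a list for a city.
--     Priority: CPCB-operated > state board > others.
--     Avoids industrial areas, airports, and university stations.
--     """
--     if not stations:
--         return None
--
--     avoid_keywords = ['airport', 'industrial', 'riico', 'midc', 'gidc', 'sidco']
--     prefer_keywords = ['cpcb', 'central', 'civil line', 'collectorate', 'sector']
--
--     # Filter out undesirable stations
--     filtered = [s for s in stations
--                 if not any(kw in s['label'].lower() for kw in avoid_keywords)]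
--     if not filtered:
--         filtered = stations  # Fall back to full list if all filtered out
--
--     # Prefer CPCB-operated or central stations
--     for kw in prefer_keywords:
--         preferred = [s for s in filtered if kw in s['label'].lower()]
--         if preferred:
--             return preferred[0]
--
--     # Default: first available station
--     return filtered[0]
-- ===== SOURCE B (Python) =====
-- def pick_best_station(stations: list) -> dict:
--     """Score each candidate by the index of the first preferred keyword it
--     matches and return the first minimum via min(), instead of one filtering
--     pass per keyword."""
--     if not stations:
--         return None
--
--     avoid_keywords = ['airport', 'industrial', 'riico', 'midc', 'gidc', 'sidco']
--     prefer_keywords = ['cpcb', 'central', 'civil line', 'collectorate', 'sector']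
--
--     filtered = [s for s in stations
--                 if not any(kw in s['label'].lower() for kw in avoid_keywords)] or stations
--
--     def score(s):
--         label = s['label'].lower()
--         return next((i for i, kw in enumerate(prefer_keywords) if kw in label),
--                     len(prefer_keywords))
--
--     return min(filtered, key=score)
-- ===== Notes on version B (the rewrite author's own statement) =====
-- stated objective: simpler
-- what changed: Replaces the per-keyword filtering passes over the candidate list by a single argmin over a per-station score (index of the first preferred keyword that matches), selected with min(), which preserves first-match tie-breaking.
import Mathlib
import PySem

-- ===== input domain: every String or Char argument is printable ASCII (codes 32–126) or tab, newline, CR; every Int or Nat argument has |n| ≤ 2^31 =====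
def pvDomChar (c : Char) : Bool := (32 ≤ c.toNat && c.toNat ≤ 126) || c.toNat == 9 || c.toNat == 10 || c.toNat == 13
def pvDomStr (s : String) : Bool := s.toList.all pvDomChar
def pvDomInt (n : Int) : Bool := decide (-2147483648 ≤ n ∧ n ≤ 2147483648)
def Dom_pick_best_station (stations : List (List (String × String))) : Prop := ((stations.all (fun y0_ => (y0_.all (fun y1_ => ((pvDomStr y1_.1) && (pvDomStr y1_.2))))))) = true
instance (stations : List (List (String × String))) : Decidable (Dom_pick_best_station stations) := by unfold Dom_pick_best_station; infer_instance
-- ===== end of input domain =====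

-- B replaces A's one-filter-pass-per-preferred-keyword selection by a single
-- argmin over a per-station score (index of the first matching preferred
-- keyword); same cost, simpler single pass.


-- ===== PORT A =====
def pvAvoidKeywords : List String := ["airport", "industrial", "riico", "midc", "gidc", "sidco"]
def pvPreferKeywords : List String := ["cpcb", "central", "civil line", "collectorate", "sector"]

-- s['label'].lower(); the .getD "" default is never reached under Pre_ (every
-- station has a "label" key; Python raises KeyError otherwise).
def pvLabelLow (s : List (String × String)) : String :=
  PySem.Str.lower (((PySem.Dict.mk s).get? "label").getD "")

def pvAvoided (s : List (String × String)) : Bool :=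
  pvAvoidKeywords.any (fun kw => PySem.Str.isIn kw (pvLabelLow s))

-- A's 'for kw in prefer_keywords' loop
def pvPickLoop (kws : List String) (filtered : List (List (String × String))) :
    Option (List (String × String)) :=
  match kws with
  | [] => PySem.List.pyGet? filtered 0
  | kw :: rest =>
    let preferred := filtered.filter (fun s => PySem.Str.isIn kw (pvLabelLow s))
    if preferred.isEmpty then pvPickLoop rest filtered
    else PySem.List.pyGet? preferred 0

def pick_best_station (stations : List (List (String × String))) : Option (List (String × String)) :=
  if stations.isEmpty then none
  else
    let filtered0 := stations.filter (fun s => !(pvAvoided s))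
    let filtered := if filtered0.isEmpty then stations else filtered0
    pvPickLoop pvPreferKeywords filtered

-- ===== PORT B =====
-- index of the first keyword contained in lbl, counting from n; len(kws)+n if none
def pvScoreAux (kws : List String) (n : Nat) (lbl : String) : Nat :=
  match kws with
  | [] => n
  | kw :: rest => if PySem.Str.isIn kw lbl then n else pvScoreAux rest (n + 1) lbl

def pvScore (s : List (String × String)) : Nat :=
  pvScoreAux pvPreferKeywords 0 (pvLabelLow s)

def pick_best_station_alt (stations : List (List (String × String))) : Option (List (String × String)) :=
  if stations.isEmpty then none
  else
    let filtered0 := stations.filter (fun s => !(pvAvoided s))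
    let filtered := if filtered0.isEmpty then stations else filtered0
    -- min(filtered, key=score): first element with minimal score
    match filtered with
    | [] => none  -- unreachable: filtered is nonempty when stations is
    | h :: t => some (t.foldl (fun best s => if pvScore s < pvScore best then s else best) h)

-- ===== PRECONDITION & SPEC =====
-- Pre_ excludes stations without a "label" key, on which Python A raises KeyError.
def Pre_pick_best_station (stations : List (List (String × String))) : Prop :=
  ∀ s ∈ stations, ((PySem.Dict.mk s).get? "label").isSome = true
instance (stations : List (List (String × String))) : Decidable (Pre_pick_best_station stations) := by unfold Pre_pick_best_station; infer_instance
def pvWitness_pick_best_station : (List (List (String × String))) :=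
  [[("label", "RIICO Zone")], [("label", "Civil Lines")], [("label", "Sector 10")]]

def Spec_pick_best_station (stations : List (List (String × String))) (out : Option (List (String × String))) : Prop := out = pick_best_station_alt stations
instance (stations : List (List (String × String))) (out : Option (List (String × String))) : Decidable (Spec_pick_best_station stations out) := by unfold Spec_pick_best_station; infer_instance

-- ===== CLAIM (what is proved, stated in full; the proofs are below) =====
def Claim_equal_pick_best_station : Prop := ∀ (stations : List (List (String × String))), Dom_pick_best_station stations → Pre_pick_best_station stations → Spec_pick_best_station stations (pick_best_station stations)

-- ===== LEMMAS AND PROOFS =====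


-- generic stable-argmin fold lemmas ---------------------------------------

theorem pvFoldMin_min_zero {α : Type} (f : α → Nat) (b : α) (t : List α) (hb : f b = 0) :
    t.foldl (fun best s => if f s < f best then s else best) b = b := by
  induction t with
  | nil => rfl
  | cons c t ih => simp [List.foldl_cons, hb]; exact ih

theorem pvFoldMin_first_zero {α : Type} (f : α → Nat) (t : List α) :
    ∀ (b y : α), t.find? (fun x => f x == 0) = some y → f b ≠ 0 →
    t.foldl (fun best s => if f s < f best then s else best) b = y := by
  induction t with
  | nil => intro b y h _; simp at h
  | cons c t ih =>
    intro b y h hb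
    by_cases hc : f c = 0
    · rw [List.find?_cons_of_pos (by simp [hc])] at h
      injection h with h
      subst h
      simp only [List.foldl_cons, hc, if_pos (Nat.pos_of_ne_zero hb)]
      exact pvFoldMin_min_zero f c t hc
    · rw [List.find?_cons_of_neg (by simp [hc])] at h
      simp only [List.foldl_cons]
      by_cases hlt : f c < f b
      · rw [if_pos hlt]; exact ih c y h hc
      · rw [if_neg hlt]; exact ih b y h hb

theorem pvFoldMin_shift {α : Type} (f g : α → Nat) (t : List α) :
    ∀ b, (∀ x ∈ b :: t, f x = g x + 1) →
    t.foldl (fun best s => if f s < f best then s else best) b =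
    t.foldl (fun best s => if g s < g best then s else best) b := by
  induction t with
  | nil => intro b _; rfl
  | cons c t ih =>
    intro b h
    have hb := h b (by simp)
    have hc := h c (by simp)
    simp only [List.foldl_cons]
    have heq : (if f c < f b then c else b) = (if g c < g b then c else b) := by
      rw [hb, hc]; simp
    rw [heq]
    by_cases hlt : g c < g b
    · simp only [if_pos hlt]; exact ih c (fun x hx => h x (by simp at hx ⊢; tauto))
    · simp only [if_neg hlt]; exact ih b (fun x hx => h x (by simp at hx ⊢; tauto))

-- facts about the score ----------------------------------------------------

theorem pvScoreAux_shift (kws : List String) (lbl : String) :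
    ∀ n, pvScoreAux kws n lbl = n + pvScoreAux kws 0 lbl := by
  induction kws with
  | nil => intro n; simp [pvScoreAux]
  | cons kw rest ih =>
    intro n
    simp only [pvScoreAux]
    split_ifs with h
    · omega
    · rw [ih (n + 1), ih 1]; omega

theorem pvScoreAux_cons_pos (kw : String) (rest : List String) (lbl : String)
    (h : PySem.Str.isIn kw lbl = true) : pvScoreAux (kw :: rest) 0 lbl = 0 := by
  simp only [pvScoreAux]; rw [if_pos h]

theorem pvScoreAux_cons_neg (kw : String) (rest : List String) (lbl : String)
    (h : ¬ PySem.Str.isIn kw lbl = true) :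
    pvScoreAux (kw :: rest) 0 lbl = pvScoreAux rest 0 lbl + 1 := by
  simp only [pvScoreAux]; rw [if_neg h, pvScoreAux_shift]; omega

-- A's keyword loop equals B's argmin ---------------------------------------

theorem pvPickLoop_eq_min (kws : List String) :
    ∀ (h : List (String × String)) (t : List (List (String × String))),
    pvPickLoop kws (h :: t) =
      some (t.foldl (fun best s =>
        if pvScoreAux kws 0 (pvLabelLow s) < pvScoreAux kws 0 (pvLabelLow best) then s else best) h) := by
  induction kws with
  | nil =>
    intro h t
    show PySem.List.pyGet? (h :: t) 0 = _
    rw [PySem.List.pyGet?_zero_cons,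
      pvFoldMin_min_zero (fun s => pvScoreAux [] 0 (pvLabelLow s)) h t rfl]
  | cons kw rest ih =>
    intro h t
    have key : pvPickLoop (kw :: rest) (h :: t) =
        (if ((h :: t).filter (fun s => PySem.Str.isIn kw (pvLabelLow s))).isEmpty then
          pvPickLoop rest (h :: t)
         else PySem.List.pyGet? ((h :: t).filter (fun s => PySem.Str.isIn kw (pvLabelLow s))) 0) := rfl
    have hfm : ∀ s, ((fun x => pvScoreAux (kw :: rest) 0 (pvLabelLow x) == 0) s)
        = ((fun x => PySem.Str.isIn kw (pvLabelLow x)) s) := by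
      intro s
      by_cases hs : PySem.Str.isIn kw (pvLabelLow s) = true
      · simp only [hs, pvScoreAux_cons_pos kw rest _ hs]; rfl
      · rw [Bool.not_eq_true] at hs
        show (pvScoreAux (kw :: rest) 0 (pvLabelLow s) == 0) = PySem.Str.isIn kw (pvLabelLow s)
        rw [pvScoreAux_cons_neg kw rest (pvLabelLow s) (ne_true_of_eq_false hs), hs]
        simp
    rw [key]
    by_cases hph : PySem.Str.isIn kw (pvLabelLow h) = true
    · -- head matches kw: A returns h; its score is 0, so the fold keeps h
      have hfil : List.filter (fun s => PySem.Str.isIn kw (pvLabelLow s)) (h :: t)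
          = h :: List.filter (fun s => PySem.Str.isIn kw (pvLabelLow s)) t :=
        List.filter_cons_of_pos hph
      rw [hfil]
      simp only [List.isEmpty_cons, Bool.false_eq_true, if_false]
      rw [PySem.List.pyGet?_zero_cons,
        pvFoldMin_min_zero (fun s => pvScoreAux (kw :: rest) 0 (pvLabelLow s)) h t
          (pvScoreAux_cons_pos kw rest _ hph)]
    · have hfil : List.filter (fun s => PySem.Str.isIn kw (pvLabelLow s)) (h :: t)
          = List.filter (fun s => PySem.Str.isIn kw (pvLabelLow s)) t :=
        List.filter_cons_of_neg (by simpa using hph)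
      rw [hfil]
      have hfh : pvScoreAux (kw :: rest) 0 (pvLabelLow h) ≠ 0 := by
        rw [pvScoreAux_cons_neg kw rest _ hph]; omega
      by_cases hpe : (t.filter (fun s => PySem.Str.isIn kw (pvLabelLow s))).isEmpty = true
      · -- nobody matches kw: every score shifts by one, recurse on rest
        rw [if_pos hpe, ih h t]
        have hall : ∀ x ∈ h :: t, ¬ PySem.Str.isIn kw (pvLabelLow x) = true := by
          intro x hx
          rcases hx with _ | hx
          · exact hph
          · exact List.filter_eq_nil_iff.mp (by simpa using hpe) x (by assumption)
        have := pvFoldMin_shift (fun s => pvScoreAux (kw :: rest) 0 (pvLabelLow s))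
          (fun s => pvScoreAux rest 0 (pvLabelLow s)) t h
          (fun x hx => pvScoreAux_cons_neg kw rest (pvLabelLow x) (hall x hx))
        rw [this]
      · -- somebody in t matches kw: A returns the first match, the fold finds it too
        obtain ⟨y, ys, hy⟩ : ∃ y ys,
            t.filter (fun s => PySem.Str.isIn kw (pvLabelLow s)) = y :: ys := by
          cases hc : t.filter (fun s => PySem.Str.isIn kw (pvLabelLow s)) with
          | nil => rw [hc] at hpe; simp at hpe
          | cons a b => exact ⟨a, b, rfl⟩
        have hfind : t.find? (fun x => pvScoreAux (kw :: rest) 0 (pvLabelLow x) == 0) = some y := by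
          have h1 : t.find? (fun s => PySem.Str.isIn kw (pvLabelLow s)) = some y := by
            rw [← List.head?_filter, hy]; rfl
          rw [show (fun x => pvScoreAux (kw :: rest) 0 (pvLabelLow x) == 0)
              = (fun x => PySem.Str.isIn kw (pvLabelLow x)) from funext hfm]
          exact h1
        rw [hy]
        simp only [List.isEmpty_cons, Bool.false_eq_true, if_false]
        rw [PySem.List.pyGet?_zero_cons,
          pvFoldMin_first_zero (fun s => pvScoreAux (kw :: rest) 0 (pvLabelLow s)) t h y hfind hfh]

-- ===== VERDICT =====
theorem pick_best_station_spec : Claim_equal_pick_best_station := by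
  intro stations _ _
  unfold Spec_pick_best_station pick_best_station pick_best_station_alt
  by_cases he : stations.isEmpty = true
  · simp [he]
  · simp only [if_neg he]
    set filtered0 := stations.filter (fun s => !(pvAvoided s)) with hf0
    set filtered := if filtered0.isEmpty then stations else filtered0 with hfil
    have hne : filtered ≠ [] := by
      rw [hfil]
      split
      · simpa using he
      · simpa using (by assumption : ¬ filtered0.isEmpty = true)
    cases hc : filtered with
    | nil => exact absurd hc hne
    | cons h t =>
      rw [pvPickLoop_eq_min pvPreferKeywords h t]
      rfl
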